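-- pv_equiv track=rewrite | github.com/JulioAlejandro-GitHub/vigilante-api | app/services/rbac_service.py | canonical_role
-- ===== SOURCE A (Python) =====
-- SUPERVISOR_ROLES = {"supervisor", "admin"}
--
-- ANALYST_ROLES = {"analyst", "operator", "reviewer"} | SUPERVISOR_ROLES
--
-- def canonical_role(roles: list[str]) -> str:
--     normalized = {role.lower() for role in roles}
--     if normalized & SUPERVISOR_ROLES:
--         return "supervisor"
--     if normalized & ANALYST_ROLES:
--         return "analyst"
--     if "auditor" in normalized:
--         return "auditor"
--     return sorted(normalized)[0] if normalized else "none"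
-- ===== SOURCE B (Python) =====
-- RANKS = {
--     "supervisor": (0, "supervisor"),
--     "admin": (0, "supervisor"),
--     "analyst": (1, "analyst"),
--     "operator": (1, "analyst"),
--     "reviewer": (1, "analyst"),
--     "auditor": (2, "auditor"),
-- }
--
-- def canonical_role(roles: list[str]) -> str:
--     normalized = {role.lower() for role in roles}
--     if not normalized:
--         return "none"
--     return min(RANKS.get(r, (3, r)) for r in normalized)[1]
-- ===== Notes on version B (the rewrite author's own statement) =====
-- stated objective: idiomatic
-- what changed: Replaces the chain of set-intersection guards plus a final sort by a single min over (rank, canonical_label) pairs looked up in one module-level rank table; the alphabetical fallback comes from the tuple tie-break instead of sorted()[0].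
import Mathlib
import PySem

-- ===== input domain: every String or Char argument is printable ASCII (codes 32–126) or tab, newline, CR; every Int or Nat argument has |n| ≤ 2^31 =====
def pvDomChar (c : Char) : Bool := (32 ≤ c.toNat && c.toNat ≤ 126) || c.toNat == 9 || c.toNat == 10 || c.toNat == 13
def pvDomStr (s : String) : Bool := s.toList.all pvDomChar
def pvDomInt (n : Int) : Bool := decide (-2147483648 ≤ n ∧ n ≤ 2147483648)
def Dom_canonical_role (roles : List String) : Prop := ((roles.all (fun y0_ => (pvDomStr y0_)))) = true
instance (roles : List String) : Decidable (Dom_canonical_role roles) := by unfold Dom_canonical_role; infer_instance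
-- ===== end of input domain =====

-- B replaces A's chain of set-intersection guards and final sort by one min over a
-- (rank, canonical_label) table with an alphabetical tuple tie-break (idiomatic; return value only).

-- ===== PORT A =====
def pvSUPERVISOR_ROLES : PySem.Set String := PySem.Set.ofList ["supervisor", "admin"]

def pvANALYST_ROLES : PySem.Set String :=
  PySem.Set.union (PySem.Set.ofList ["analyst", "operator", "reviewer"]) pvSUPERVISOR_ROLES

def canonical_role (roles : List String) : String :=
  let normalized : PySem.Set String := PySem.Set.ofList (roles.map PySem.Str.lower)
  if PySem.Set.inter normalized pvSUPERVISOR_ROLES ≠ [] then "supervisor"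
  else if PySem.Set.inter normalized pvANALYST_ROLES ≠ [] then "analyst"
  else if PySem.Set.contains normalized "auditor" then "auditor"
  else if normalized ≠ [] then
    -- sorted(normalized)[0]: index 0 of a list that is nonempty under this guard
    (PySem.List.sorted normalized (fun x => x) false).headD "none"
  else "none"

-- ===== PORT B =====
def pvRANKS : PySem.Dict String (Int × String) :=
  PySem.Dict.mk
    [("supervisor", ((0 : Int), "supervisor")), ("admin", ((0 : Int), "supervisor")),
     ("analyst", ((1 : Int), "analyst")), ("operator", ((1 : Int), "analyst")),
     ("reviewer", ((1 : Int), "analyst")), ("auditor", ((2 : Int), "auditor"))]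

-- RANKS.get(r, (3, r))
def pvRank (r : String) : Int × String := PySem.Dict.getD pvRANKS r (3, r)

def canonical_role_alt (roles : List String) : String :=
  let normalized : PySem.Set String := PySem.Set.ofList (roles.map PySem.Str.lower)
  if normalized.isEmpty then "none"
  else
    -- min over the (rank, label) tuples, ported as min2? with the lexicographic tuple key;
    -- elements tying under the key map to identical tuples, so set iteration order is immaterial
    match PySem.List.min2? normalized (fun r => (pvRank r).1) (fun r => (pvRank r).2) with
    | some m => (pvRank m).2
    | none => "none"

-- ===== PRECONDITION & SPEC =====
def Spec_canonical_role (roles : List String) (out : String) : Prop := out = canonical_role_alt roles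
instance (roles : List String) (out : String) : Decidable (Spec_canonical_role roles out) := by unfold Spec_canonical_role; infer_instance

-- ===== CLAIM (what is proved, stated in full; the proofs are below) =====
def Claim_equal_canonical_role : Prop := ∀ (roles : List String), Dom_canonical_role roles → Spec_canonical_role roles (canonical_role roles)

-- ===== LEMMAS AND PROOFS =====

-- the fold step of min2? with our two keys
def pvStep (acc : Option String) (x : String) : Option String :=
  match acc with
  | none => some x
  | some m =>
    if (decide ((pvRank x).1 < (pvRank m).1) ||
        !decide ((pvRank m).1 < (pvRank x).1) && decide ((pvRank x).2 < (pvRank m).2)) = true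
    then some x else some m

lemma pv_min2_eq_foldl (s : List String) :
    PySem.List.min2? s (fun r => (pvRank r).1) (fun r => (pvRank r).2) = s.foldl pvStep none := by
  unfold PySem.List.min2? pvStep
  congr 1
  funext acc x
  cases acc <;> rfl

-- lexicographic "rank of a is ≤ rank of b"
def pvLeq (a b : String) : Prop :=
  (pvRank a).1 ≤ (pvRank b).1 ∧ ((pvRank a).1 = (pvRank b).1 → (pvRank a).2 ≤ (pvRank b).2)

lemma pvLeq_refl (a : String) : pvLeq a a := ⟨le_refl _, fun _ => le_refl _⟩

lemma pvLeq_trans {a b c : String} (h1 : pvLeq a b) (h2 : pvLeq b c) : pvLeq a c := by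
  obtain ⟨h11, h12⟩ := h1; obtain ⟨h21, h22⟩ := h2
  refine ⟨le_trans h11 h21, fun he => ?_⟩
  have e1 : (pvRank a).1 = (pvRank b).1 := le_antisymm h11 (he ▸ h21)
  exact le_trans (h12 e1) (h22 (e1 ▸ he))

lemma pvStep_cases (a x : String) :
    (pvStep (some a) x = some x ∧ pvLeq x a) ∨ (pvStep (some a) x = some a ∧ pvLeq a x) := by
  simp only [pvStep]
  by_cases hxa : (pvRank x).1 < (pvRank a).1
  · exact Or.inl ⟨by simp [hxa], le_of_lt hxa, fun he => absurd he (ne_of_lt hxa)⟩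
  by_cases hax : (pvRank a).1 < (pvRank x).1
  · exact Or.inr ⟨by simp [hxa, hax], le_of_lt hax, fun he => absurd he (ne_of_lt hax)⟩
  have e : (pvRank x).1 = (pvRank a).1 := le_antisymm (not_lt.mp hax) (not_lt.mp hxa)
  by_cases h2 : (pvRank x).2 < (pvRank a).2
  · exact Or.inl ⟨by simp [hxa, hax, h2], le_of_eq e, fun _ => le_of_lt h2⟩
  · exact Or.inr ⟨by simp [hxa, hax, h2], le_of_eq e.symm, fun _ => not_lt.mp h2⟩

lemma pv_fold_spec : ∀ (s : List String) (a m : String),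
    s.foldl pvStep (some a) = some m →
    (m = a ∨ m ∈ s) ∧ pvLeq m a ∧ ∀ y ∈ s, pvLeq m y := by
  intro s
  induction s with
  | nil => intro a m h; simp at h; exact ⟨Or.inl h.symm, h ▸ pvLeq_refl a, by simp⟩
  | cons x t ih =>
    intro a m h
    simp only [List.foldl_cons] at h
    rcases pvStep_cases a x with ⟨he, hl⟩ | ⟨he, hl⟩
    · rw [he] at h
      obtain ⟨hm, hla, hall⟩ := ih x m h
      refine ⟨?_, pvLeq_trans hla hl, ?_⟩
      · rcases hm with hm | hm
        · exact Or.inr (by rw [hm]; exact List.mem_cons_self)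
        · exact Or.inr (List.mem_cons_of_mem _ hm)
      · intro y hy
        rcases List.mem_cons.mp hy with hy | hy
        · exact hy ▸ hla
        · exact hall y hy
    · rw [he] at h
      obtain ⟨hm, hla, hall⟩ := ih a m h
      refine ⟨?_, hla, ?_⟩
      · rcases hm with hm | hm
        · exact Or.inl hm
        · exact Or.inr (List.mem_cons_of_mem _ hm)
      · intro y hy
        rcases List.mem_cons.mp hy with hy | hy
        · exact hy ▸ pvLeq_trans hla hl
        · exact hall y hy

lemma pvRank_supervisor : pvRank "supervisor" = (0, "supervisor") := by rfl
lemma pvRank_admin : pvRank "admin" = (0, "supervisor") := by rfl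
lemma pvRank_analyst : pvRank "analyst" = (1, "analyst") := by rfl
lemma pvRank_operator : pvRank "operator" = (1, "analyst") := by rfl
lemma pvRank_reviewer : pvRank "reviewer" = (1, "analyst") := by rfl
lemma pvRank_auditor : pvRank "auditor" = (2, "auditor") := by rfl

-- the four shapes pvRank can take
lemma pvRank_cases (r : String) :
    ((r = "supervisor" ∨ r = "admin") ∧ pvRank r = (0, "supervisor")) ∨
    ((r = "analyst" ∨ r = "operator" ∨ r = "reviewer") ∧ pvRank r = (1, "analyst")) ∨
    (r = "auditor" ∧ pvRank r = (2, "auditor")) ∨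
    ((r ≠ "supervisor" ∧ r ≠ "admin" ∧ r ≠ "analyst" ∧ r ≠ "operator" ∧ r ≠ "reviewer" ∧ r ≠ "auditor") ∧
      pvRank r = (3, r)) := by
  by_cases h1 : r = "supervisor"
  · exact Or.inl ⟨Or.inl h1, h1 ▸ pvRank_supervisor⟩
  by_cases h2 : r = "admin"
  · exact Or.inl ⟨Or.inr h2, h2 ▸ pvRank_admin⟩
  by_cases h3 : r = "analyst"
  · exact Or.inr (Or.inl ⟨Or.inl h3, h3 ▸ pvRank_analyst⟩)
  by_cases h4 : r = "operator"
  · exact Or.inr (Or.inl ⟨Or.inr (Or.inl h4), h4 ▸ pvRank_operator⟩)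
  by_cases h5 : r = "reviewer"
  · exact Or.inr (Or.inl ⟨Or.inr (Or.inr h5), h5 ▸ pvRank_reviewer⟩)
  by_cases h6 : r = "auditor"
  · exact Or.inr (Or.inr (Or.inl ⟨h6, h6 ▸ pvRank_auditor⟩))
  · refine Or.inr (Or.inr (Or.inr ⟨⟨h1, h2, h3, h4, h5, h6⟩, ?_⟩))
    have e1 : (("supervisor" : String) == r) = false := beq_eq_false_iff_ne.mpr (Ne.symm h1)
    have e2 : (("admin" : String) == r) = false := beq_eq_false_iff_ne.mpr (Ne.symm h2)
    have e3 : (("analyst" : String) == r) = false := beq_eq_false_iff_ne.mpr (Ne.symm h3)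
    have e4 : (("operator" : String) == r) = false := beq_eq_false_iff_ne.mpr (Ne.symm h4)
    have e5 : (("reviewer" : String) == r) = false := beq_eq_false_iff_ne.mpr (Ne.symm h5)
    have e6 : (("auditor" : String) == r) = false := beq_eq_false_iff_ne.mpr (Ne.symm h6)
    simp [pvRank, pvRANKS, PySem.Dict.getD, PySem.Dict.get?, e1, e2, e3, e4, e5, e6]

lemma pvRank_nonneg (r : String) : 0 ≤ (pvRank r).1 := by
  rcases pvRank_cases r with ⟨_, h⟩ | ⟨_, h⟩ | ⟨_, h⟩ | ⟨_, h⟩ <;> simp [h]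

-- if the minimum's rank is 0 / 1 / 2, its label is the corresponding canonical one
lemma pvLabel_of_rank0 {m : String} (h0 : (pvRank m).1 = 0) : (pvRank m).2 = "supervisor" := by
  rcases pvRank_cases m with ⟨_, hh⟩ | ⟨_, hh⟩ | ⟨_, hh⟩ | ⟨_, hh⟩ <;> rw [hh] at h0 ⊢ <;>
    first | rfl | (exact absurd h0 (by norm_num))
lemma pvLabel_of_rank1 {m : String} (h1 : (pvRank m).1 = 1) : (pvRank m).2 = "analyst" := by
  rcases pvRank_cases m with ⟨_, hh⟩ | ⟨_, hh⟩ | ⟨_, hh⟩ | ⟨_, hh⟩ <;> rw [hh] at h1 ⊢ <;>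
    first | rfl | (exact absurd h1 (by norm_num))
lemma pvLabel_of_rank2 {m : String} (h2 : (pvRank m).1 = 2) : (pvRank m).2 = "auditor" := by
  rcases pvRank_cases m with ⟨_, hh⟩ | ⟨_, hh⟩ | ⟨_, hh⟩ | ⟨_, hh⟩ <;> rw [hh] at h2 ⊢ <;>
    first | rfl | (exact absurd h2 (by norm_num))

lemma pvRank1_of_mem {m : String} (h : m = "analyst" ∨ m = "operator" ∨ m = "reviewer") :
    (pvRank m).1 = 1 := by
  rcases h with h | h | h
  · simp [h, pvRank_analyst]
  · simp [h, pvRank_operator]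
  · simp [h, pvRank_reviewer]

lemma pv_main (s : List String) :
    (if PySem.Set.inter s pvSUPERVISOR_ROLES ≠ [] then "supervisor"
     else if PySem.Set.inter s pvANALYST_ROLES ≠ [] then "analyst"
     else if PySem.Set.contains s "auditor" then "auditor"
     else if s ≠ [] then (PySem.List.sorted s (fun x => x) false).headD "none" else "none")
    = (if s.isEmpty then "none"
       else match PySem.List.min2? s (fun r => (pvRank r).1) (fun r => (pvRank r).2) with
         | some m => (pvRank m).2
         | none => "none") := by
  rcases s with _ | ⟨x, t⟩
  · simp [PySem.Set.inter, PySem.Set.contains]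
  -- the min exists
  have hminex : ∀ (u : List String) (a : String), ∃ m, u.foldl pvStep (some a) = some m := by
    intro u
    induction u with
    | nil => exact fun a => ⟨a, rfl⟩
    | cons z v ih =>
      intro a
      simp only [List.foldl_cons]
      rcases pvStep_cases a z with ⟨he, _⟩ | ⟨he, _⟩ <;> rw [he] <;> exact ih _
  obtain ⟨m, hm⟩ := hminex t x
  obtain ⟨hmem0, hla, hall⟩ := pv_fold_spec t x m hm
  have hmem : m ∈ x :: t := by
    rcases hmem0 with h | h
    · rw [h]; exact List.mem_cons_self
    · exact List.mem_cons_of_mem _ h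
  have hmin : ∀ y ∈ x :: t, pvLeq m y := by
    intro y hy
    rcases List.mem_cons.mp hy with hy | hy
    · exact hy ▸ hla
    · exact hall y hy
  have hBval : (if (x :: t).isEmpty then "none"
       else match PySem.List.min2? (x :: t) (fun r => (pvRank r).1) (fun r => (pvRank r).2) with
         | some m => (pvRank m).2
         | none => "none") = (pvRank m).2 := by
    rw [pv_min2_eq_foldl]
    simp only [List.foldl_cons]
    have hx : pvStep none x = some x := rfl
    rw [hx, hm]
    simp
  rw [hBval]
  -- membership characterizations of A's guards
  have hsup_iff : PySem.Set.inter (x :: t) pvSUPERVISOR_ROLES ≠ [] ↔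
      ∃ r ∈ x :: t, r = "supervisor" ∨ r = "admin" := by
    constructor
    · intro h
      rcases List.exists_mem_of_ne_nil _ h with ⟨r, hr⟩
      have hri := (PySem.Set.mem_inter (x :: t) pvSUPERVISOR_ROLES r).mp hr
      refine ⟨r, hri.1, ?_⟩
      have h2 := hri.2
      simp [pvSUPERVISOR_ROLES, PySem.Set.ofList] at h2
      tauto
    · rintro ⟨r, hr, hro⟩
      intro hnil
      have hrm : r ∈ PySem.Set.inter (x :: t) pvSUPERVISOR_ROLES := by
        refine (PySem.Set.mem_inter (x :: t) pvSUPERVISOR_ROLES r).mpr ⟨hr, ?_⟩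
        rcases hro with h | h <;> simp [pvSUPERVISOR_ROLES, PySem.Set.ofList, h]
      rw [hnil] at hrm; exact absurd hrm (List.not_mem_nil)
  have hana_iff : PySem.Set.inter (x :: t) pvANALYST_ROLES ≠ [] ↔
      ∃ r ∈ x :: t, r = "analyst" ∨ r = "operator" ∨ r = "reviewer" ∨ r = "supervisor" ∨ r = "admin" := by
    constructor
    · intro h
      rcases List.exists_mem_of_ne_nil _ h with ⟨r, hr⟩
      have hri := (PySem.Set.mem_inter (x :: t) pvANALYST_ROLES r).mp hr
      refine ⟨r, hri.1, ?_⟩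
      have h2 := hri.2
      simp [pvANALYST_ROLES, pvSUPERVISOR_ROLES, PySem.Set.union, PySem.Set.ofList] at h2
      tauto
    · rintro ⟨r, hr, hro⟩
      intro hnil
      have hrm : r ∈ PySem.Set.inter (x :: t) pvANALYST_ROLES := by
        refine (PySem.Set.mem_inter (x :: t) pvANALYST_ROLES r).mpr ⟨hr, ?_⟩
        rcases hro with h | h | h | h | h <;>
          simp [pvANALYST_ROLES, pvSUPERVISOR_ROLES, PySem.Set.union, PySem.Set.ofList, h]
      rw [hnil] at hrm; exact absurd hrm (List.not_mem_nil)
  have haud_iff : PySem.Set.contains (x :: t) "auditor" = true ↔ ("auditor" : String) ∈ x :: t := by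
    simp [PySem.Set.contains]
  by_cases hsup : PySem.Set.inter (x :: t) pvSUPERVISOR_ROLES ≠ []
  · -- a supervisor role is present: the minimal rank is 0
    rw [if_pos hsup]
    obtain ⟨r, hr, hro⟩ := hsup_iff.mp hsup
    have hr0 : (pvRank r).1 = 0 := by
      rcases hro with h | h
      · simp [h, pvRank_supervisor]
      · simp [h, pvRank_admin]
    have h0 : (pvRank m).1 = 0 := le_antisymm (hr0 ▸ (hmin r hr).1) (pvRank_nonneg m)
    exact (pvLabel_of_rank0 h0).symm
  · rw [if_neg hsup]
    have hnosup : ∀ r ∈ x :: t, r ≠ "supervisor" ∧ r ≠ "admin" := by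
      intro r hr
      constructor
      · exact fun he => hsup (hsup_iff.mpr ⟨r, hr, Or.inl he⟩)
      · exact fun he => hsup (hsup_iff.mpr ⟨r, hr, Or.inr he⟩)
    have hm_ne0 : (pvRank m).1 ≠ 0 := by
      intro h0
      rcases pvRank_cases m with ⟨hc, _⟩ | ⟨_, hh⟩ | ⟨_, hh⟩ | ⟨_, hh⟩
      · rcases hc with h | h
        · exact (hnosup m hmem).1 h
        · exact (hnosup m hmem).2 h
      all_goals (rw [hh] at h0; norm_num at h0)
    by_cases hana : PySem.Set.inter (x :: t) pvANALYST_ROLES ≠ []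
    · -- an analyst-tier role is present (and no supervisor): the minimal rank is 1
      rw [if_pos hana]
      obtain ⟨r, hr, hro⟩ := hana_iff.mp hana
      have hro' : r = "analyst" ∨ r = "operator" ∨ r = "reviewer" := by
        rcases hro with h | h | h | h | h
        · exact Or.inl h
        · exact Or.inr (Or.inl h)
        · exact Or.inr (Or.inr h)
        · exact absurd h (hnosup r hr).1
        · exact absurd h (hnosup r hr).2
      have hr1 : (pvRank r).1 = 1 := pvRank1_of_mem hro'
      have h1 : (pvRank m).1 = 1 := by
        have hge := pvRank_nonneg m
        have hle := hr1 ▸ (hmin r hr).1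
        omega
      exact (pvLabel_of_rank1 h1).symm
    · rw [if_neg hana]
      have hnoana : ∀ r ∈ x :: t, r ≠ "analyst" ∧ r ≠ "operator" ∧ r ≠ "reviewer" := by
        intro r hr
        refine ⟨fun he => hana (hana_iff.mpr ⟨r, hr, Or.inl he⟩),
          fun he => hana (hana_iff.mpr ⟨r, hr, Or.inr (Or.inl he)⟩),
          fun he => hana (hana_iff.mpr ⟨r, hr, Or.inr (Or.inr (Or.inl he))⟩)⟩
      have hm_ne1 : (pvRank m).1 ≠ 1 := by
        intro h1
        rcases pvRank_cases m with ⟨_, hh⟩ | ⟨hc, _⟩ | ⟨_, hh⟩ | ⟨_, hh⟩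
        · rw [hh] at h1; norm_num at h1
        · rcases hc with h | h | h
          · exact (hnoana m hmem).1 h
          · exact (hnoana m hmem).2.1 h
          · exact (hnoana m hmem).2.2 h
        all_goals (rw [hh] at h1; norm_num at h1)
      by_cases haud : PySem.Set.contains (x :: t) "auditor" = true
      · -- "auditor" present (no higher tier): the minimal rank is 2
        rw [if_pos haud]
        have hr : ("auditor" : String) ∈ x :: t := haud_iff.mp haud
        have h2 : (pvRank m).1 = 2 := by
          have hge := pvRank_nonneg m
          have hle := (hmin _ hr).1
          rw [pvRank_auditor] at hle
          omega
        exact (pvLabel_of_rank2 h2).symm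
      · rw [if_neg haud]
        have hnoaud : ("auditor" : String) ∉ x :: t := fun h => haud (haud_iff.mpr h)
        -- every element is unrecognized: its tuple is (3, itself), so the min is the least string
        have hunk : ∀ r ∈ x :: t, pvRank r = (3, r) := by
          intro r hr
          rcases pvRank_cases r with ⟨hc, _⟩ | ⟨hc, _⟩ | ⟨hc, _⟩ | ⟨_, hh⟩
          · rcases hc with h | h
            · exact absurd h (hnosup r hr).1
            · exact absurd h (hnosup r hr).2
          · rcases hc with h | h | h
            · exact absurd h (hnoana r hr).1
            · exact absurd h (hnoana r hr).2.1
            · exact absurd h (hnoana r hr).2.2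
          · exact absurd (hc ▸ hr) hnoaud
          · exact hh
        rw [if_pos (by simp : (x :: t) ≠ [])]
        obtain ⟨h, tl, hsort⟩ : ∃ h tl, PySem.List.sorted (x :: t) (fun x => x) false = h :: tl := by
          rcases hhh : PySem.List.sorted (x :: t) (fun x => x) false with _ | ⟨h, tl⟩
          · exact absurd ((PySem.List.sorted_eq_nil_iff _ _ _).mp hhh) (List.cons_ne_nil x t)
          · exact ⟨h, tl, rfl⟩
        rw [hsort]
        have hhs : h ∈ x :: t :=
          (PySem.List.mem_sorted (xs := x :: t) (key := fun x => x) (rev := false) h).mp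
            (by rw [hsort]; exact List.mem_cons_self)
        have hh_le_m : h ≤ m := PySem.List.key_head_sorted_le (x :: t) (fun x => x) hsort m hmem
        have hm_le_h : m ≤ h := by
          have hq := (hmin h hhs).2
          rw [hunk m hmem, hunk h hhs] at hq
          exact hq rfl
        rw [hunk m hmem]
        simp [le_antisymm hh_le_m hm_le_h]

-- ===== VERDICT (by name: the statement is the Claim_ definition above) =====
theorem canonical_role_spec : Claim_equal_canonical_role := by
  intro roles _
  unfold Spec_canonical_role canonical_role canonical_role_alt
  exact pv_main _
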